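-- pv_equiv track=rewrite | github.com/sufiyahathena/Math-with-Number-Vizualization | sufiyah_sajan_functions_part2.py | two_vertical_lines
-- ===== SOURCE A (Python) =====
-- def two_vertical_lines(height, width):
--     hor = ''
--     x = 0
--     while x < height:
--         hor += '*'
--         for y in range(width):
--             hor += ' '
--         x += 1
--         if x != height:
--             hor += '*\n'
--         if x == height:
--             hor += '*'
--     return hor
-- ===== SOURCE B (Python) =====
-- def two_vertical_lines(height, width):
--     if height <= 0:
--         return ''
--     line = '*' + ' ' * width + '*'
--     return '\n'.join([line] * height)
-- ===== Notes on version B (the rewrite author's own statement) =====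
-- stated objective: simpler
-- what changed: Replaces A's while loop with per-cell character appends and x==height/x!=height branches by building one row string '*'+' '*width+'*' and joining height copies with newlines (avoiding A's quadratic repeated string concatenation).
import Mathlib
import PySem

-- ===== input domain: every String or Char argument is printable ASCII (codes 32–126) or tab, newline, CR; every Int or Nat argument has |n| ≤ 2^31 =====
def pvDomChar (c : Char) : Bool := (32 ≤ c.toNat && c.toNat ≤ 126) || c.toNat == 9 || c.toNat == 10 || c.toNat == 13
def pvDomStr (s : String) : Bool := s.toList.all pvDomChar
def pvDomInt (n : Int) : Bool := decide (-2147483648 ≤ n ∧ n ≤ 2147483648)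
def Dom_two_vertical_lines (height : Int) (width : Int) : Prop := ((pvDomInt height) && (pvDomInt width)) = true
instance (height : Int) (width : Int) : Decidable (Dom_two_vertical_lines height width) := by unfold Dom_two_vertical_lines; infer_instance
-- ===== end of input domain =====

-- B replaces A's character-by-character while/for loops with one row string and a join; objective: simpler.

-- ===== PORT A =====
-- for y in range(width): hor += ' '
def pvSpacesA (width : Int) : String :=
  (PySem.List.pyRange 0 width 1).foldl (fun acc _ => acc ++ " ") ""

-- the while loop of A: state (x, hor)
def pvLoopA (height : Int) (width : Int) (x : Int) (hor : String) : String :=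
  if _hx : x < height then
    let hor := hor ++ "*" ++ pvSpacesA width
    let x := x + 1
    let hor := if x ≠ height then hor ++ "*\n" else hor
    let hor := if x = height then hor ++ "*" else hor
    pvLoopA height width x hor
  else hor
termination_by (height - x).toNat
decreasing_by omega

def two_vertical_lines (height : Int) (width : Int) : String :=
  pvLoopA height width 0 ""

-- ===== PORT B =====
-- line = '*' + ' ' * width + '*'   (str * int: empty for a non-positive count — exact)
def pvLineB (width : Int) : String :=
  "*" ++ String.ofList (List.replicate width.toNat ' ') ++ "*"

def two_vertical_lines_alt (height : Int) (width : Int) : String :=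
  if height ≤ 0 then ""
  else PySem.Str.join "\n" (PySem.List.pyRepeat [pvLineB width] height)

-- ===== PRECONDITION & SPEC =====
def Spec_two_vertical_lines (height : Int) (width : Int) (out : String) : Prop := out = two_vertical_lines_alt height width
instance (height : Int) (width : Int) (out : String) : Decidable (Spec_two_vertical_lines height width out) := by unfold Spec_two_vertical_lines; infer_instance

-- ===== CLAIM (what is proved, stated in full; the proofs are below) =====
def Claim_equal_two_vertical_lines : Prop := ∀ (height : Int) (width : Int), Dom_two_vertical_lines height width → Spec_two_vertical_lines height width (two_vertical_lines height width)

-- ===== LEMMAS AND PROOFS =====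

lemma pvSpacesA_toList (width : Int) :
    (pvSpacesA width).toList = List.replicate width.toNat ' ' := by
  have gen : ∀ (l : List Int) (acc : String),
      (l.foldl (fun acc _ => acc ++ " ") acc).toList = acc.toList ++ List.replicate l.length ' ' := by
    intro l
    induction l with
    | nil => intro acc; simp
    | cons h t ih =>
      intro acc
      simp [List.foldl_cons, ih, List.replicate_succ]
  have := gen (PySem.List.pyRange 0 width 1) ""
  simpa [pvSpacesA, PySem.List.length_pyRange_one] using this

lemma pvJoin_rep_succ (m : Nat) (a : String) :
    PySem.Str.join "\n" (List.replicate (m + 2) a)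
      = a ++ "\n" ++ PySem.Str.join "\n" (List.replicate (m + 1) a) := by
  rw [← String.toList_inj]
  simp [PySem.Str.join, List.replicate_succ, PySem.Chars.join_cons_cons]

lemma pvLoopA_eq (height width : Int) :
    ∀ (n : Nat) (x : Int) (hor : String), (height - x).toNat = n →
      pvLoopA height width x hor = hor ++ PySem.Str.join "\n" (List.replicate n (pvLineB width)) := by
  intro n
  induction n with
  | zero =>
    intro x hor hn
    have hx : ¬ x < height := by omega
    rw [pvLoopA, dif_neg hx]
    rw [← String.toList_inj]; simp
  | succ m ih =>
    intro x hor hn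
    have hx : x < height := by omega
    rw [pvLoopA, dif_pos hx]
    simp only []
    by_cases hend : x + 1 = height
    · have hm : m = 0 := by omega
      subst hm
      have h0 : (height - (x + 1)).toNat = 0 := by omega
      rw [if_pos hend, if_neg (not_not_intro hend), ih (x + 1) _ h0]
      rw [← String.toList_inj]
      simp [pvLineB, pvSpacesA_toList]
    · have hm : (height - (x + 1)).toNat = m := by omega
      have hm1 : 1 ≤ m := by omega
      obtain ⟨k, rfl⟩ : ∃ k, m = k + 1 := ⟨m - 1, by omega⟩
      rw [if_neg hend, if_pos hend, ih (x + 1) _ hm]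
      rw [pvJoin_rep_succ]
      rw [← String.toList_inj]
      simp [pvLineB, pvSpacesA_toList]

-- ===== VERDICT (by name: the statement is the Claim_ definition above) =====
theorem two_vertical_lines_spec : Claim_equal_two_vertical_lines := by
  intro height width _
  unfold Spec_two_vertical_lines two_vertical_lines two_vertical_lines_alt
  rw [pvLoopA_eq height width (height - 0).toNat 0 "" rfl]
  by_cases hh : height ≤ 0
  · have h0 : (height - 0).toNat = 0 := by omega
    rw [if_pos hh, h0]
    rfl
  · rw [if_neg hh, PySem.List.pyRepeat_singleton]
    rw [← String.toList_inj]
    simp
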